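-- pv_equiv track=rewrite | github.com/esaran1/actual-cyberwave-hack | accent-coach/api/speech/score.py | _phoneme_distance
-- ===== SOURCE A (Python) =====
-- from typing import Callable, Dict, List
--
-- def _phoneme_distance(expected: List[str], observed: List[str]) -> tuple[int, List[tuple[str, str]]]:
--     rows = len(expected) + 1
--     cols = len(observed) + 1
--     dp = [[0] * cols for _ in range(rows)]
--     for i in range(rows):
--         dp[i][0] = i
--     for j in range(cols):
--         dp[0][j] = j
--     subs: List[tuple[str, str]] = []
--     for i in range(1, rows):
--         for j in range(1, cols):
--             cost = 0 if expected[i - 1] == observed[j - 1] else 1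
--             dp[i][j] = min(
--                 dp[i - 1][j] + 1,
--                 dp[i][j - 1] + 1,
--                 dp[i - 1][j - 1] + cost,
--             )
--     # Backtrace to collect substitutions
--     i, j = len(expected), len(observed)
--     while i > 0 and j > 0:
--         current = dp[i][j]
--         if expected[i - 1] == observed[j - 1]:
--             i -= 1
--             j -= 1
--         elif current == dp[i - 1][j - 1] + 1:
--             subs.append((expected[i - 1], observed[j - 1]))
--             i -= 1
--             j -= 1
--         elif current == dp[i - 1][j] + 1:
--             i -= 1
--         else:
--             j -= 1
--     return dp[-1][-1], subs
-- ===== SOURCE B (Python) =====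
-- from typing import List
--
-- def _phoneme_distance(expected: List[str], observed: List[str]) -> tuple[int, List[tuple[str, str]]]:
--     # One forward pass over (distance, substitution-trail) cells, two rows at a
--     # time: no table is kept and there is no backtrace phase at all.
--     prev = [(j, []) for j in range(len(observed) + 1)]
--     for i, e in enumerate(expected, 1):
--         cur = [(i, [])]
--         for j, o in enumerate(observed, 1):
--             dd, sd = prev[j - 1]
--             du, su = prev[j]
--             dl, sl = cur[j - 1]
--             cost = 0 if e == o else 1
--             v = min(du + 1, dl + 1, dd + cost)
--             if cost == 0:
--                 cur.append((v, sd))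
--             elif v == dd + 1:
--                 cur.append((v, [(e, o)] + sd))
--             elif v == du + 1:
--                 cur.append((v, su))
--             else:
--                 cur.append((v, sl))
--         prev = cur
--     d, subs = prev[-1]
--     return d, list(subs)
-- ===== Notes on version B (the rewrite author's own statement) =====
-- stated objective: simpler
-- what changed: B removes the whole backtrace phase and the stored table: each DP cell is a (distance, substitution-trail) pair computed in one forward pass keeping only two rows, and the answer is read off the last cell.
import Mathlib
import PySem

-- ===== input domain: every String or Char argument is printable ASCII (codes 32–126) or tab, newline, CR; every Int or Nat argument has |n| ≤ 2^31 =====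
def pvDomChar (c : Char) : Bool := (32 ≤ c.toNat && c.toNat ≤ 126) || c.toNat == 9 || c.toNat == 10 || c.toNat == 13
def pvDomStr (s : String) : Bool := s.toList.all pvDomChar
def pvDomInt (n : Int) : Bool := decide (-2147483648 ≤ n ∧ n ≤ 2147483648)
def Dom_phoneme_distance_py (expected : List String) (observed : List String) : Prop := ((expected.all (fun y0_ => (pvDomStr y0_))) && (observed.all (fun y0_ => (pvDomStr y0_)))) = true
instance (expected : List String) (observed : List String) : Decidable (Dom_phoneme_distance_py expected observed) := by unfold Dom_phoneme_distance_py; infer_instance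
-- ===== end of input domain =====

-- B removes A's stored table and backtrace phase: each DP cell carries its
-- substitution trail, computed in one forward pass over two rows (objective: simpler).

-- ===== PORT A =====
-- 2-D table helpers for A's in-place updates (dp[i][j] = v / dp[i][j])
def pvGet2 (dp : List (List Int)) (i j : Nat) : Int := (dp.getD i []).getD j 0
def pvSet2 (dp : List (List Int)) (i j : Nat) (v : Int) : List (List Int) :=
  dp.set i ((dp.getD i []).set j v)

-- A's backtrace while-loop: while i > 0 and j > 0 …
def pvBtA (expected observed : List String) (dp : List (List Int)) :
    Nat → Nat → List (String × String) → List (String × String)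
  | i + 1, j + 1, subs =>
      let current := pvGet2 dp (i + 1) (j + 1)
      if expected.getD i "" = observed.getD j "" then
        pvBtA expected observed dp i j subs
      else if current = pvGet2 dp i j + 1 then
        pvBtA expected observed dp i j (subs ++ [(expected.getD i "", observed.getD j "")])
      else if current = pvGet2 dp i (j + 1) + 1 then
        pvBtA expected observed dp i (j + 1) subs
      else
        pvBtA expected observed dp (i + 1) j subs
  | 0, _, subs => subs
  | _ + 1, 0, subs => subs
termination_by i j _ => i + j

def phoneme_distance_py (expected : List String) (observed : List String) :
    Int × (List (String × String)) :=
  let rows := expected.length + 1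
  let cols := observed.length + 1
  let dp := List.replicate rows (List.replicate cols (0 : Int))
  let dp := (List.range rows).foldl (fun dp i => pvSet2 dp i 0 (i : Int)) dp
  let dp := (List.range cols).foldl (fun dp j => pvSet2 dp 0 j (j : Int)) dp
  let dp := (List.range' 1 expected.length).foldl (fun dp i =>
    (List.range' 1 observed.length).foldl (fun dp j =>
      let cost : Int := if expected.getD (i - 1) "" = observed.getD (j - 1) "" then 0 else 1
      pvSet2 dp i j (min (pvGet2 dp (i - 1) j + 1)
        (min (pvGet2 dp i (j - 1) + 1) (pvGet2 dp (i - 1) (j - 1) + cost)))) dp) dp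
  (pvGet2 dp (rows - 1) (cols - 1), pvBtA expected observed dp expected.length observed.length [])

-- ===== PORT B =====
-- a cell is (distance, substitution trail)
-- B's inner loop: extend the current row, carrying the cell just written (left)
def pvRowRecB (ei : String) : List String → List (Int × List (String × String)) →
    (Int × List (String × String)) → List (Int × List (String × String))
  | [], _, _ => []
  | _ :: _, [], _ => []
  | oj :: os, diag :: rest, left =>
      let up := rest.headD (0, [])
      let cost : Int := if ei = oj then 0 else 1
      let v := min (up.1 + 1) (min (left.1 + 1) (diag.1 + cost))
      let cell :=
        if cost = 0 then (v, diag.2)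
        else if v = diag.1 + 1 then (v, (ei, oj) :: diag.2)
        else if v = up.1 + 1 then (v, up.2)
        else (v, left.2)
      cell :: pvRowRecB ei os rest cell

-- B's outer loop: replace prev by cur for each expected phoneme, keep the final row
def pvRowsB (o : List String) : List String → Nat →
    List (Int × List (String × String)) → List (Int × List (String × String))
  | [], _, prev => prev
  | ei :: es, i, prev =>
      let cur := ((i : Int) + 1, ([] : List (String × String)))
        :: pvRowRecB ei o prev ((i : Int) + 1, [])
      pvRowsB o es (i + 1) cur

def phoneme_distance_py_alt (expected : List String) (observed : List String) :
    Int × (List (String × String)) :=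
  let row0 : List (Int × List (String × String)) :=
    (0, []) :: (List.range observed.length).map (fun j : Nat => ((j : Int) + 1, []))
  let fin := pvRowsB observed expected 0 row0
  let cell := fin.getLastD (0, [])
  (cell.1, cell.2)

-- ===== PRECONDITION & SPEC =====
def Spec_phoneme_distance_py (expected : List String) (observed : List String) (out : Int × (List (String × String))) : Prop := out = phoneme_distance_py_alt expected observed
instance (expected : List String) (observed : List String) (out : Int × (List (String × String))) : Decidable (Spec_phoneme_distance_py expected observed out) := by unfold Spec_phoneme_distance_py; infer_instance

-- ===== CLAIM (what is proved, stated in full; the proofs are below) =====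
def Claim_equal_phoneme_distance_py : Prop := ∀ (expected : List String) (observed : List String), Dom_phoneme_distance_py expected observed → Spec_phoneme_distance_py expected observed (phoneme_distance_py expected observed)

-- ===== LEMMAS AND PROOFS =====

-- the mathematical cell: (dp value, substitution trail), the common meaning of both programs
def pvC (e o : List String) : Nat → Nat → Int × List (String × String)
  | 0, j => ((j : Int), [])
  | i + 1, 0 => ((i : Int) + 1, [])
  | i + 1, j + 1 =>
      let dd := pvC e o i j
      let du := pvC e o i (j + 1)
      let dl := pvC e o (i + 1) j
      let cost : Int := if e.getD i "" = o.getD j "" then 0 else 1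
      let v := min (du.1 + 1) (min (dl.1 + 1) (dd.1 + cost))
      if cost = 0 then (v, dd.2)
      else if v = dd.1 + 1 then (v, (e.getD i "", o.getD j "") :: dd.2)
      else if v = du.1 + 1 then (v, du.2)
      else (v, dl.2)
termination_by i j => (i, j)

theorem pvC_0j (e o : List String) (j : Nat) : pvC e o 0 j = ((j : Int), []) := by rw [pvC]
theorem pvC_i0 (e o : List String) (i : Nat) : pvC e o (i + 1) 0 = ((i : Int) + 1, []) := by rw [pvC]

theorem pvC_succ (e o : List String) (i j : Nat) :
    pvC e o (i + 1) (j + 1) =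
      (let dd := pvC e o i j
       let du := pvC e o i (j + 1)
       let dl := pvC e o (i + 1) j
       let cost : Int := if e.getD i "" = o.getD j "" then 0 else 1
       let v := min (du.1 + 1) (min (dl.1 + 1) (dd.1 + cost))
       if cost = 0 then (v, dd.2)
       else if v = dd.1 + 1 then (v, (e.getD i "", o.getD j "") :: dd.2)
       else if v = du.1 + 1 then (v, du.2)
       else (v, dl.2)) := by rw [pvC]

theorem pvC_fst_succ (e o : List String) (i j : Nat) :
    (pvC e o (i + 1) (j + 1)).1 =
      min ((pvC e o i (j + 1)).1 + 1)
        (min ((pvC e o (i + 1) j).1 + 1)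
          ((pvC e o i j).1 + (if e.getD i "" = o.getD j "" then (0 : Int) else 1))) := by
  rw [pvC_succ]
  dsimp only
  split_ifs <;> rfl

theorem pvC_fst_border_row (e o : List String) (a : Nat) : (pvC e o a 0).1 = (a : Int) := by
  cases a with
  | zero => rw [pvC_0j]
  | succ a => rw [pvC_i0]; push_cast; ring

theorem pvC_fst_border_col (e o : List String) (b : Nat) : (pvC e o 0 b).1 = (b : Int) := by
  rw [pvC_0j]

-- ---- generic list-table lemmas ----
theorem pvGetD_lt {α : Type} {l : List α} {i : Nat} (h : i < l.length) (d : α) : l.getD i d = l[i] := by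
  simp [List.getD_eq_getElem?_getD, List.getElem?_eq_getElem h]

def pvRect (dp : List (List Int)) (r c : Nat) : Prop :=
  dp.length = r ∧ ∀ row ∈ dp, row.length = c

theorem pvRect_set2 {dp : List (List Int)} {r c : Nat} (h : pvRect dp r c)
    (i j : Nat) (v : Int) : pvRect (pvSet2 dp i j v) r c := by
  obtain ⟨h1, h2⟩ := h
  by_cases hi : i < dp.length
  · refine ⟨by simpa [pvSet2] using h1, ?_⟩
    intro row hrow
    rcases List.mem_or_eq_of_mem_set hrow with hmem | heq
    · exact h2 _ hmem
    · subst heq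
      rw [pvGetD_lt hi]
      simpa using h2 _ (dp.getElem_mem hi)
  · rw [pvSet2, List.set_eq_of_length_le (Nat.le_of_not_lt hi)]
    exact ⟨h1, h2⟩

theorem pvGet2_set2 {dp : List (List Int)} {r c : Nat} (h : pvRect dp r c)
    {i j : Nat} (hi : i < r) (hj : j < c) (v : Int) (a b : Nat) :
    pvGet2 (pvSet2 dp i j v) a b = if a = i ∧ b = j then v else pvGet2 dp a b := by
  obtain ⟨h1, h2⟩ := h
  have hi' : i < dp.length := h1 ▸ hi
  have hj' : j < (dp[i]?.getD []).length := by
    rw [List.getElem?_eq_getElem hi', Option.getD_some, h2 _ (dp.getElem_mem hi')]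
    exact hj
  simp only [pvGet2, pvSet2, List.getD_eq_getElem?_getD]
  rw [List.getElem?_set]
  by_cases ha : i = a
  · subst ha
    rw [if_pos rfl, if_pos hi', Option.getD_some, List.getElem?_set]
    by_cases hb : j = b
    · subst hb
      rw [if_pos rfl, if_pos hj']
      simp
    · rw [if_neg hb, if_neg (by omega)]
  · rw [if_neg ha, if_neg (by omega)]

theorem pvGet2_replicate (r c a b : Nat) :
    pvGet2 (List.replicate r (List.replicate c (0 : Int))) a b = 0 := by
  simp only [pvGet2, List.getD_eq_getElem?_getD, List.getElem?_replicate]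
  rcases Nat.lt_or_ge a r with h | h
  · rw [if_pos h, Option.getD_some]
    rcases Nat.lt_or_ge b c with h2 | h2
    · rw [List.getElem?_replicate, if_pos h2]; rfl
    · rw [List.getElem?_replicate, if_neg (by omega)]; rfl
  · rw [if_neg (by omega)]; rfl

-- ---- A: border initialisation ----
theorem pvA_init1 (r c k : Nat) (hk : k ≤ r) (hc : 0 < c) :
    pvRect ((List.range k).foldl (fun dp i => pvSet2 dp i 0 (i : Int))
      (List.replicate r (List.replicate c (0 : Int)))) r c ∧
    (∀ a b, pvGet2 ((List.range k).foldl (fun dp i => pvSet2 dp i 0 (i : Int))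
      (List.replicate r (List.replicate c (0 : Int)))) a b
      = if a < k ∧ b = 0 then (a : Int) else 0) := by
  induction k with
  | zero =>
      constructor
      · exact ⟨by simp, by intro row hrow; simp_all [List.eq_of_mem_replicate hrow]⟩
      · intro a b
        simp [pvGet2_replicate]
  | succ k ih =>
      obtain ⟨ihr, ihg⟩ := ih (by omega)
      rw [List.range_succ, List.foldl_append]
      simp only [List.foldl_cons, List.foldl_nil]
      refine ⟨pvRect_set2 ihr _ _ _, ?_⟩
      intro a b
      rw [pvGet2_set2 ihr (by omega) hc _ a b, ihg a b]
      split_ifs <;> first | rfl | omega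

theorem pvA_init2 (r c k : Nat) (hk : k ≤ c) (hr : 0 < r)
    {dp : List (List Int)} (hrect : pvRect dp r c)
    (hg : ∀ a b, pvGet2 dp a b = if a < r ∧ b = 0 then (a : Int) else 0) :
    pvRect ((List.range k).foldl (fun dp j => pvSet2 dp 0 j (j : Int)) dp) r c ∧
    (∀ a b, pvGet2 ((List.range k).foldl (fun dp j => pvSet2 dp 0 j (j : Int)) dp) a b
      = if a = 0 ∧ b < k then (b : Int) else if a < r ∧ b = 0 then (a : Int) else 0) := by
  induction k with
  | zero =>
      simp only [List.range_zero, List.foldl_nil]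
      refine ⟨hrect, ?_⟩
      intro a b
      rw [hg a b]
      split_ifs <;> first | rfl | omega
  | succ k ih =>
      obtain ⟨ihr, ihg⟩ := ih (by omega)
      rw [List.range_succ, List.foldl_append]
      simp only [List.foldl_cons, List.foldl_nil]
      refine ⟨pvRect_set2 ihr _ _ _, ?_⟩
      intro a b
      rw [pvGet2_set2 ihr hr (by omega) _ a b, ihg a b]
      split_ifs <;> first | rfl | omega

-- ---- A: the fill loops ----
theorem pvA_fill_inner (e o : List String) (i : Nat) (hi1 : 1 ≤ i) (hi2 : i ≤ e.length)
    (dp : List (List Int))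
    (hrect : pvRect dp (e.length + 1) (o.length + 1))
    (hg : ∀ a b, a < e.length + 1 → b < o.length + 1 → (a < i ∨ b = 0) →
      pvGet2 dp a b = (pvC e o a b).1) :
    ∀ m, m ≤ o.length →
      pvRect ((List.range' 1 m).foldl (fun dp j =>
        let cost : Int := if e.getD (i - 1) "" = o.getD (j - 1) "" then 0 else 1
        pvSet2 dp i j (min (pvGet2 dp (i - 1) j + 1)
          (min (pvGet2 dp i (j - 1) + 1) (pvGet2 dp (i - 1) (j - 1) + cost)))) dp)
        (e.length + 1) (o.length + 1) ∧
      ∀ a b, a < e.length + 1 → b < o.length + 1 → (a < i ∨ b = 0 ∨ (a = i ∧ b ≤ m)) →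
        pvGet2 ((List.range' 1 m).foldl (fun dp j =>
          let cost : Int := if e.getD (i - 1) "" = o.getD (j - 1) "" then 0 else 1
          pvSet2 dp i j (min (pvGet2 dp (i - 1) j + 1)
            (min (pvGet2 dp i (j - 1) + 1) (pvGet2 dp (i - 1) (j - 1) + cost)))) dp) a b
        = (pvC e o a b).1 := by
  intro m
  induction m with
  | zero =>
      intro _
      simp only [List.range'_zero, List.foldl_nil]
      refine ⟨hrect, ?_⟩
      intro a b ha hb hreg
      exact hg a b ha hb (by omega)
  | succ m ih =>
      intro hm
      obtain ⟨ihr, ihg⟩ := ih (by omega)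
      obtain ⟨i', rfl⟩ : ∃ i', i = i' + 1 := ⟨i - 1, by omega⟩
      have hconc : List.range' 1 (m + 1) = List.range' 1 m ++ [m + 1] := by
        rw [List.range'_concat]; simp [Nat.add_comm]
      rw [hconc, List.foldl_append]
      simp only [List.foldl_cons, List.foldl_nil]
      simp only [Nat.add_sub_cancel] at ihr ihg ⊢
      refine ⟨pvRect_set2 ihr _ _ _, ?_⟩
      intro a b ha hb hreg
      rw [pvGet2_set2 ihr (by omega) (by omega) _ a b]
      by_cases hcell : a = i' + 1 ∧ b = m + 1
      · obtain ⟨rfl, rfl⟩ := hcell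
        rw [if_pos ⟨rfl, rfl⟩]
        rw [ihg i' (m + 1) (by omega) (by omega) (by omega),
          ihg (i' + 1) m (by omega) (by omega) (by omega),
          ihg i' m (by omega) (by omega) (by omega),
          pvC_fst_succ]
      · rw [if_neg hcell]
        exact ihg a b ha hb (by omega)

theorem pvA_fill (e o : List String)
    (dp : List (List Int))
    (hrect : pvRect dp (e.length + 1) (o.length + 1))
    (hg : ∀ a b, a < e.length + 1 → b < o.length + 1 → (a = 0 ∨ b = 0) →
      pvGet2 dp a b = (pvC e o a b).1) :
    ∀ k, k ≤ e.length →
      pvRect ((List.range' 1 k).foldl (fun dp i =>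
        (List.range' 1 o.length).foldl (fun dp j =>
          let cost : Int := if e.getD (i - 1) "" = o.getD (j - 1) "" then 0 else 1
          pvSet2 dp i j (min (pvGet2 dp (i - 1) j + 1)
            (min (pvGet2 dp i (j - 1) + 1) (pvGet2 dp (i - 1) (j - 1) + cost)))) dp) dp)
        (e.length + 1) (o.length + 1) ∧
      ∀ a b, a < e.length + 1 → b < o.length + 1 → (a ≤ k ∨ b = 0) →
        pvGet2 ((List.range' 1 k).foldl (fun dp i =>
          (List.range' 1 o.length).foldl (fun dp j =>
            let cost : Int := if e.getD (i - 1) "" = o.getD (j - 1) "" then 0 else 1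
            pvSet2 dp i j (min (pvGet2 dp (i - 1) j + 1)
              (min (pvGet2 dp i (j - 1) + 1) (pvGet2 dp (i - 1) (j - 1) + cost)))) dp) dp) a b
        = (pvC e o a b).1 := by
  intro k
  induction k with
  | zero =>
      intro _
      simp only [List.range'_zero, List.foldl_nil]
      exact ⟨hrect, fun a b ha hb hreg => hg a b ha hb (by omega)⟩
  | succ k ih =>
      intro hk
      obtain ⟨ihr, ihg⟩ := ih (by omega)
      have hconc : List.range' 1 (k + 1) = List.range' 1 k ++ [k + 1] := by
        rw [List.range'_concat]; simp [Nat.add_comm]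
      rw [hconc, List.foldl_append]
      simp only [List.foldl_cons, List.foldl_nil]
      obtain ⟨hr2, hg2⟩ := pvA_fill_inner e o (k + 1) (by omega) (by omega) _ ihr
        (fun a b ha hb hreg => ihg a b ha hb (by omega)) o.length (le_refl _)
      exact ⟨hr2, fun a b ha hb hreg => hg2 a b ha hb (by omega)⟩

-- ---- A: the whole table ----
theorem pvA_table (e o : List String) :
    ∀ i j, i ≤ e.length → j ≤ o.length →
      pvGet2 ((List.range' 1 e.length).foldl (fun dp i =>
        (List.range' 1 o.length).foldl (fun dp j =>
          let cost : Int := if e.getD (i - 1) "" = o.getD (j - 1) "" then 0 else 1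
          pvSet2 dp i j (min (pvGet2 dp (i - 1) j + 1)
            (min (pvGet2 dp i (j - 1) + 1) (pvGet2 dp (i - 1) (j - 1) + cost)))) dp)
        ((List.range (o.length + 1)).foldl (fun dp j => pvSet2 dp 0 j (j : Int))
          ((List.range (e.length + 1)).foldl (fun dp i => pvSet2 dp i 0 (i : Int))
            (List.replicate (e.length + 1) (List.replicate (o.length + 1) (0 : Int)))))) i j
      = (pvC e o i j).1 := by
  intro i j hi hj
  obtain ⟨h1r, h1g⟩ := pvA_init1 (e.length + 1) (o.length + 1) (e.length + 1) (le_refl _) (by omega)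
  have h1g' : ∀ a b, pvGet2 ((List.range (e.length + 1)).foldl (fun dp i => pvSet2 dp i 0 (i : Int))
      (List.replicate (e.length + 1) (List.replicate (o.length + 1) (0 : Int)))) a b
      = if a < e.length + 1 ∧ b = 0 then (a : Int) else 0 := h1g
  obtain ⟨h2r, h2g⟩ := pvA_init2 (e.length + 1) (o.length + 1) (o.length + 1) (le_refl _)
    (by omega) h1r h1g'
  have hg0 : ∀ a b, a < e.length + 1 → b < o.length + 1 → (a = 0 ∨ b = 0) →
      pvGet2 ((List.range (o.length + 1)).foldl (fun dp j => pvSet2 dp 0 j (j : Int))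
        ((List.range (e.length + 1)).foldl (fun dp i => pvSet2 dp i 0 (i : Int))
          (List.replicate (e.length + 1) (List.replicate (o.length + 1) (0 : Int))))) a b
      = (pvC e o a b).1 := by
    intro a b ha hb hreg
    rw [h2g a b]
    rcases hreg with rfl | rfl
    · rw [if_pos ⟨rfl, hb⟩, pvC_fst_border_col]
    · by_cases ha0 : a = 0
      · subst ha0; rw [if_pos ⟨rfl, by omega⟩, pvC_fst_border_col]
      · rw [if_neg (by omega), if_pos ⟨ha, rfl⟩, pvC_fst_border_row]
  obtain ⟨h3r, h3g⟩ := pvA_fill e o _ h2r hg0 e.length (le_refl _)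
  exact h3g i j (by omega) (by omega) (by omega)

-- ---- A: the backtrace returns the trail of pvC ----
theorem pvBtA_eq (e o : List String) (dp : List (List Int))
    (hdp : ∀ i j, i ≤ e.length → j ≤ o.length → pvGet2 dp i j = (pvC e o i j).1) :
    ∀ n i j subs, i ≤ e.length → j ≤ o.length → i + j ≤ n →
      pvBtA e o dp i j subs = subs ++ (pvC e o i j).2 := by
  intro n
  induction n with
  | zero =>
      intro i j subs hi hj hn
      obtain ⟨rfl, rfl⟩ : i = 0 ∧ j = 0 := by omega
      simp [pvBtA, pvC_0j]
  | succ n ih =>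
      intro i j subs hi hj hn
      cases i with
      | zero => simp [pvBtA, pvC_0j]
      | succ a =>
          cases j with
          | zero => simp [pvBtA, pvC_i0]
          | succ b =>
              have hcur := hdp (a + 1) (b + 1) hi hj
              have hdd := hdp a b (by omega) (by omega)
              have hdu := hdp a (b + 1) (by omega) hj
              simp only [pvBtA]
              rw [hcur, hdd, hdu, pvC_fst_succ]
              by_cases hm : e.getD a "" = o.getD b ""
              · rw [if_pos hm, ih a b subs (by omega) (by omega) (by omega), pvC_succ,
                  if_pos hm]
                norm_num
              · rw [if_neg hm, pvC_succ]
                simp only [if_neg hm]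
                norm_num
                split_ifs with h1 h2
                · rw [ih a b _ (by omega) (by omega) (by omega)]
                  simp
                · rw [ih a (b + 1) subs (by omega) hj (by omega)]
                · rw [ih (a + 1) b subs hi (by omega) (by omega)]

-- ---- B: the rows ----
theorem pvMapRange_drop {α : Type} (f : Nat → α) (m t : Nat) (h : t < m) :
    ((List.range m).map f).drop t = f t :: ((List.range m).map f).drop (t + 1) := by
  rw [List.drop_eq_getElem_cons (by simpa using h)]
  simp

theorem pvMapRange_headD {α : Type} (f : Nat → α) (m t : Nat) (h : t < m) (d : α) :
    ((((List.range m).map f).drop t)).headD d = f t := by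
  rw [pvMapRange_drop f m t h]
  rfl

theorem pvRowRecB_eq (e o : List String) (i : Nat) (_hi : i < e.length) :
    ∀ n t, t + n = o.length →
      pvRowRecB (e.getD i "") (o.drop t)
        (((List.range (o.length + 1)).map (pvC e o i)).drop t)
        (pvC e o (i + 1) t)
      = (List.range' (t + 1) n).map (pvC e o (i + 1)) := by
  intro n
  induction n with
  | zero =>
      intro t ht
      rw [List.drop_eq_nil_of_le (by omega)]
      rfl
  | succ n ihn =>
      intro t ht
      have hto : t < o.length := by omega
      rw [List.drop_eq_getElem_cons hto,
        pvMapRange_drop (pvC e o i) (o.length + 1) t (by omega)]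
      simp only [pvRowRecB]
      rw [pvMapRange_headD (pvC e o i) (o.length + 1) (t + 1) (by omega)]
      have hot : o[t] = o.getD t "" := (pvGetD_lt hto "").symm
      rw [hot]
      have hcell := pvC_succ e o i t
      simp only [] at hcell
      rw [List.range'_succ, List.map_cons, ← hcell]
      rw [ihn (t + 1) (by omega)]

theorem pvMapRange_succ_head {α : Type} (f : Nat → α) (n : Nat) :
    (List.range (n + 1)).map f = f 0 :: (List.range' 1 n).map f := by
  rw [List.range_eq_range', List.range'_succ]
  simp

theorem pvRowsB_eq (e o : List String) :
    ∀ es i, i ≤ e.length → es = e.drop i →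
      pvRowsB o es i ((List.range (o.length + 1)).map (pvC e o i))
      = (List.range (o.length + 1)).map (pvC e o e.length) := by
  intro es
  induction es with
  | nil =>
      intro i hle h
      have hge : e.length ≤ i := List.drop_eq_nil_iff.mp h.symm
      have : i = e.length := le_antisymm hle hge
      subst this
      rfl
  | cons ei es ih =>
      intro i hle h
      have hi : i < e.length := by
        by_contra hc
        rw [List.drop_eq_nil_of_le (by omega)] at h
        simp at h
      rw [List.drop_eq_getElem_cons hi] at h
      obtain ⟨rfl, hes⟩ : ei = e[i] ∧ es = e.drop (i + 1) := ⟨by injection h, by injection h⟩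
      simp only [pvRowsB]
      have hD : ((i : Int) + 1, ([] : List (String × String))) = pvC e o (i + 1) 0 :=
        (pvC_i0 e o i).symm
      have hei : e[i] = e.getD i "" := (pvGetD_lt hi "").symm
      rw [hD, hei]
      have hrow := pvRowRecB_eq e o i hi o.length 0 (by omega)
      simp only [List.drop_zero] at hrow
      rw [hrow, ← pvMapRange_succ_head (pvC e o (i + 1)) o.length]
      exact ih (i + 1) (by omega) hes

theorem pvGetLastD_map_range {α : Type} (f : Nat → α) (n : Nat) (d : α) :
    ((List.range (n + 1)).map f).getLastD d = f n := by
  rw [List.range_succ, List.map_append]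
  simp

-- ===== VERDICT (by name: the statement is the Claim_ definition above) =====
theorem phoneme_distance_py_spec : Claim_equal_phoneme_distance_py := by
  intro e o _
  unfold Spec_phoneme_distance_py
  show phoneme_distance_py e o = phoneme_distance_py_alt e o
  simp only [phoneme_distance_py, phoneme_distance_py_alt, Nat.add_sub_cancel]
  have hdp := pvA_table e o
  have hrow0 : ((0 : Int), ([] : List (String × String)))
      :: (List.range o.length).map (fun j : Nat => ((j : Int) + 1, ([] : List (String × String))))
      = (List.range (o.length + 1)).map (pvC e o 0) := by
    apply List.ext_getElem
    · simp
    · intro n h1 h2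
      cases n with
      | zero => simp [pvC_0j]
      | succ n => simp at h1 ⊢; rw [pvC_0j]; push_cast; ring_nf
  rw [hrow0, pvRowsB_eq e o e 0 (by omega) (by simp), pvGetLastD_map_range]
  rw [Prod.mk.injEq]
  constructor
  · exact hdp e.length o.length (le_refl _) (le_refl _)
  · rw [pvBtA_eq e o _ hdp (e.length + o.length) e.length o.length []
      (le_refl _) (le_refl _) (le_refl _)]
    simp
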